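-- pv_equiv track=rewrite | github.com/KeemHD/Interview-Question | Interview_Practice_Question.py | getBonuses
-- ===== SOURCE A (Python) =====
-- def getBonuses(performance):
--     # Fill this in.
--     bonus = []
--     bonus_total = 1
--     prev = performance[0]
--
--     for i in range(len(performance)-1):
--         next = performance[i+1]
--
--         if performance[i] > prev:
--             bonus_total+=1
--         if performance[i] > next:
--             bonus_total+=1
--
--         bonus.append(bonus_total)
--         prev = performance[i]
--         bonus_total = 1
--
--     if performance[-1] > prev:
--         bonus_total+=1
--
--     bonus.append(bonus_total)
--
--     return bonus
-- ===== SOURCE B (Python) =====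
-- def getBonuses(performance):
--     n = len(performance)
--     result = [1] * n
--     for i in range(1, n):          # forward pass: left-neighbor contribution
--         if performance[i] > performance[i - 1]:
--             result[i] += 1
--     for i in range(n - 1):         # backward contribution in a second pass
--         if performance[i] > performance[i + 1]:
--             result[i] += 1
--     return result
-- ===== Notes on version B (the rewrite author's own statement) =====
-- stated objective: simpler
-- what changed: Replaces A's single interleaved scan threading prev/bonus_total state and a separate last-element epilogue with an all-ones result array of length n updated by two independent stateless passes (forward left-neighbor, then right-neighbor).
import Mathlib
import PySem

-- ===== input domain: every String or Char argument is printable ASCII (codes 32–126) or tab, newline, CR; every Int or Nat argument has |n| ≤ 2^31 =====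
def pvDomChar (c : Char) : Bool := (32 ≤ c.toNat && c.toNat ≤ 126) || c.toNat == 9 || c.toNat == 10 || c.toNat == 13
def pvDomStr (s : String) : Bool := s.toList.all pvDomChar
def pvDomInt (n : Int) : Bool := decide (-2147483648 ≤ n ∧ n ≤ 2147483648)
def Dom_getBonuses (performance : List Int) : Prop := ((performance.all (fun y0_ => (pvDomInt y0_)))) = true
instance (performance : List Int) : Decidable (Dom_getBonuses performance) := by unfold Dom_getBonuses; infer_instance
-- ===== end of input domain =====

-- B replaces A's single interleaved scan (which threads prev/bonus_total state and needs a
-- separate last-element epilogue) with an all-ones array updated by two independent stateless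
-- neighbor passes (objective: simpler decomposition, same O(n) cost).

-- ===== PORT A =====
-- literal transliteration of A: one loop over range(len-1) threading (bonus, prev),
-- then the last-element epilogue appending the final bonus.
def getBonuses (performance : List Int) : List Int :=
  let prev0 := PySem.List.pyGetD performance 0 0
  let st := (PySem.List.pyRange 0 ((performance.length : Int) - 1) 1).foldl
    (fun (st : List Int × Int) i =>
      let next := PySem.List.pyGetD performance (i + 1) 0
      let bt : Int := 1
      let bt := if PySem.List.pyGetD performance i 0 > st.2 then bt + 1 else bt
      let bt := if PySem.List.pyGetD performance i 0 > next then bt + 1 else bt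
      (st.1 ++ [bt], PySem.List.pyGetD performance i 0))
    ([], prev0)
  let bt : Int := 1
  let bt := if PySem.List.pyGetD performance (-1) 0 > st.2 then bt + 1 else bt
  st.1 ++ [bt]


-- ===== PORT B =====
-- literal transliteration of B: an all-ones result array, a forward pass over range(1, n), then a
-- pass over range(n - 1), each incrementing result[i] in place (pySetD = in-range res[i] = v).
def getBonuses_alt (performance : List Int) : List Int :=
  let n : Int := performance.length
  let res0 := List.replicate performance.length (1 : Int)
  let res1 := (PySem.List.pyRange 1 n 1).foldl
    (fun res i =>
      if PySem.List.pyGetD performance i 0 > PySem.List.pyGetD performance (i - 1) 0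
      then PySem.List.pySetD res i (PySem.List.pyGetD res i 0 + 1) else res) res0
  let res2 := (PySem.List.pyRange 0 (n - 1) 1).foldl
    (fun res i =>
      if PySem.List.pyGetD performance i 0 > PySem.List.pyGetD performance (i + 1) 0
      then PySem.List.pySetD res i (PySem.List.pyGetD res i 0 + 1) else res) res1
  res2


-- ===== PRECONDITION & SPEC =====
-- A reads the first element before its loop, so it raises IndexError exactly on the empty list.
def Pre_getBonuses (performance : List Int) : Prop := performance ≠ []
instance (performance : List Int) : Decidable (Pre_getBonuses performance) := by unfold Pre_getBonuses; infer_instance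
def pvWitness_getBonuses : List Int := [3, 1, 2]

def Spec_getBonuses (performance : List Int) (out : List Int) : Prop := out = getBonuses_alt performance
instance (performance : List Int) (out : List Int) : Decidable (Spec_getBonuses performance out) := by unfold Spec_getBonuses; infer_instance

-- ===== CLAIM (what is proved, stated in full; the proofs are below) =====
def Claim_equal_getBonuses : Prop := ∀ (performance : List Int), Dom_getBonuses performance → Pre_getBonuses performance → Spec_getBonuses performance (getBonuses performance)

-- ===== LEMMAS AND PROOFS =====
-- Both programs are characterized by the closed form fF: bonus k = 1 (+1 if the left
-- neighbor is smaller) (+1 if the right neighbor is smaller).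
def fF (p : List Int) (k : Nat) : Int :=
  1 + (if 0 < k ∧ p.getD k 0 > p.getD (k-1) 0 then 1 else 0)
    + (if k + 1 < p.length ∧ p.getD k 0 > p.getD (k+1) 0 then 1 else 0)
def entryA (p : List Int) (k : Nat) : Int :=
  let bt : Int := 1
  let bt := if p.getD k 0 > (if k = 0 then p.getD 0 0 else p.getD (k-1) 0) then bt + 1 else bt
  if p.getD k 0 > p.getD (k+1) 0 then bt + 1 else bt
theorem entryA_eq_fF (p : List Int) (k : Nat) (hk : k + 1 < p.length) :
    entryA p k = fF p k := by
  unfold entryA fF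
  dsimp only
  by_cases h0 : k = 0
  · subst h0
    simp only [if_pos]
    split_ifs <;> omega
  · rw [if_neg h0]
    split_ifs <;> omega

theorem pass_length (P : Int → Prop) [DecidablePred P] (l : List Int) (res : List Int) :
    (l.foldl (fun r i => if P i then PySem.List.pySetD r i (PySem.List.pyGetD r i 0 + 1) else r) res).length
      = res.length := by
  induction l generalizing res with
  | nil => rfl
  | cons x l ih =>
      simp only [List.foldl_cons]
      rw [ih]
      split
      · exact PySem.List.length_pySetD ..
      · rfl

theorem pass_getD (P : Int → Prop) [DecidablePred P] (a b : Nat) (res : List Int)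
    (hb : b ≤ res.length) (k : Nat) (hk : k < res.length) :
    ((PySem.List.pyRange (a : Int) (b : Int) 1).foldl
        (fun r i => if P i then PySem.List.pySetD r i (PySem.List.pyGetD r i 0 + 1) else r) res).getD k 0
      = res.getD k 0 + (if a ≤ k ∧ k < b ∧ P (k : Int) then 1 else 0) := by
  induction b generalizing res with
  | zero =>
      rw [PySem.List.pyRange_one_eq_nil (by exact_mod_cast Nat.zero_le a)]
      simp
  | succ b ih =>
      by_cases hab : a ≤ b
      · have hcast : ((b + 1 : Nat) : Int) = (b : Int) + 1 := by push_cast; ring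
        rw [hcast, PySem.List.pyRange_one_succ_right (by exact_mod_cast hab), List.foldl_append]
        simp only [List.foldl_cons, List.foldl_nil]
        have hlen : (((PySem.List.pyRange (a : Int) (b : Int) 1).foldl
            (fun r i => if P i then PySem.List.pySetD r i (PySem.List.pyGetD r i 0 + 1) else r) res).length)
            = res.length := pass_length ..
        by_cases hP : P (b : Int)
        · rw [if_pos hP, PySem.List.pySetD_natCast]
          by_cases hkb : b = k
          · subst hkb
            rw [List.getD_eq_getElem _ _ (by rw [List.length_set]; omega),
                List.getElem_set, if_pos rfl,
                PySem.List.pyGetD_natCast]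
            rw [ih res (by omega) hk]
            rw [if_neg (by omega), if_pos ⟨hab, by omega, hP⟩]
            ring
          · rw [List.getD_eq_getElem _ _ (by rw [List.length_set]; omega),
                List.getElem_set, if_neg hkb,
                ← List.getD_eq_getElem _ _ (by omega : k < _), ih res (by omega) hk]
            by_cases h1 : a ≤ k ∧ k < b ∧ P (k : Int)
            · rw [if_pos h1, if_pos ⟨h1.1, by omega, h1.2.2⟩]
            · rw [if_neg h1, if_neg (fun ⟨x, y, z⟩ => h1 ⟨x, by omega, z⟩)]
        · rw [if_neg hP, ih res (by omega) hk]
          by_cases h1 : a ≤ k ∧ k < b ∧ P (k : Int)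
          · rw [if_pos h1, if_pos ⟨h1.1, by omega, h1.2.2⟩]
          · rw [if_neg h1, if_neg ?_]
            rintro ⟨x, y, z⟩
            rcases Nat.lt_succ_iff_lt_or_eq.mp y with h | h
            · exact h1 ⟨x, h, z⟩
            · subst h; exact hP z
      · rw [PySem.List.pyRange_one_eq_nil (by push_cast; omega)]
        simp only [List.foldl_nil]
        rw [if_neg (by rintro ⟨x, y, z⟩; omega)]
        simp

theorem pass_getD_int (P : Int → Prop) [DecidablePred P] (a b : Int) (res : List Int)
    (ha : 0 ≤ a) (hb : b ≤ (res.length : Int)) (k : Nat) (hk : k < res.length) :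
    ((PySem.List.pyRange a b 1).foldl
        (fun r i => if P i then PySem.List.pySetD r i (PySem.List.pyGetD r i 0 + 1) else r) res).getD k 0
      = res.getD k 0 + (if a ≤ (k : Int) ∧ (k : Int) < b ∧ P (k : Int) then 1 else 0) := by
  rcases le_or_gt 0 b with h0 | h0
  · obtain ⟨bn, rfl⟩ : ∃ bn : Nat, b = (bn : Int) := ⟨b.toNat, by omega⟩
    obtain ⟨an, rfl⟩ : ∃ an : Nat, a = (an : Int) := ⟨a.toNat, by omega⟩
    rw [pass_getD P an bn res (by exact_mod_cast hb) k hk]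
    by_cases hc : an ≤ k ∧ k < bn ∧ P (k : Int)
    · rw [if_pos hc, if_pos ⟨by exact_mod_cast hc.1, by exact_mod_cast hc.2.1, hc.2.2⟩]
    · rw [if_neg hc, if_neg ?_]
      rintro ⟨x, y, z⟩
      exact hc ⟨by exact_mod_cast x, by exact_mod_cast y, z⟩
  · rw [PySem.List.pyRange_one_eq_nil (by omega)]
    simp only [List.foldl_nil]
    rw [if_neg (by rintro ⟨x, y, z⟩; omega)]
    simp


theorem loopA (p : List Int) (hn : 1 ≤ p.length) :
    ∀ (m j : Nat) (acc : List Int) (pv : Int),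
    j + m = p.length - 1 →
    pv = (if j = 0 then p.getD 0 0 else p.getD (j-1) 0) →
    ((PySem.List.pyRange (j : Int) ((p.length : Int) - 1) 1).foldl
      (fun (st : List Int × Int) i =>
        (st.1 ++ [if PySem.List.pyGetD p i 0 > PySem.List.pyGetD p (i + 1) 0 then
            (if PySem.List.pyGetD p i 0 > st.2 then 1 + 1 else 1) + 1
          else if PySem.List.pyGetD p i 0 > st.2 then 1 + 1 else 1],
         PySem.List.pyGetD p i 0))
      (acc, pv))
    = (acc ++ (List.range m).map (fun t => entryA p (j + t)),
       if p.length - 1 = 0 then p.getD 0 0 else p.getD (p.length - 2) 0) := by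
  intro m
  induction m with
  | zero =>
      intro j acc pv hj hpv
      have hcast : ((p.length : Int) - 1) = (j : Int) := by omega
      rw [hcast, PySem.List.pyRange_one_eq_nil le_rfl]
      simp only [List.foldl_nil, List.range_zero, List.map_nil, List.append_nil]
      refine Prod.ext rfl ?_
      simp only
      by_cases hj0 : j = 0
      · subst hj0
        rw [if_pos (by omega)]
        simpa using hpv
      · rw [if_neg (by omega)]
        rw [hpv, if_neg hj0]
        congr 1
        omega
  | succ m ih =>
      intro j acc pv hj hpv
      have hlt : (j : Int) < (p.length : Int) - 1 := by omega
      rw [PySem.List.pyRange_one_cons hlt, List.foldl_cons]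
      simp only [PySem.List.pyGetD_natCast]
      have hc1 : ((j : Int) + 1) = ((j + 1 : Nat) : Int) := by push_cast; ring
      rw [hc1]
      simp only [PySem.List.pyGetD_natCast]
      rw [ih (j+1) _ _ (by omega) (by rw [if_neg (Nat.succ_ne_zero j)]; simp)]
      refine Prod.ext ?_ rfl
      simp only
      rw [List.append_assoc]
      congr 1
      rw [List.range_succ_eq_map, List.map_cons, List.map_map, List.singleton_append]
      rw [hpv]
      congr 1
      apply List.map_congr_left
      intro a ha
      simp only [Function.comp_apply, Nat.succ_eq_add_one]
      congr 1
      omega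


theorem A_closed (p : List Int) (hp : p ≠ []) :
    getBonuses p = (List.range p.length).map (fF p) := by
  have hn : 1 ≤ p.length := List.length_pos_iff.mpr hp
  unfold getBonuses
  dsimp only
  have hA := loopA p hn (p.length - 1) 0 [] (PySem.List.pyGetD p 0 0) (by omega)
      (by simp [PySem.List.pyGetD_zero])
  rw [Nat.cast_zero] at hA
  rw [hA]
  dsimp only
  have hlast : PySem.List.pyGetD p (-1) 0 = p.getD (p.length - 1) 0 := by
    rw [PySem.List.pyGetD_neg_one p 0 hp, List.getLast_eq_getElem,
        List.getD_eq_getElem _ _ (by omega)]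
  rw [hlast]
  have hrange : List.range p.length = List.range (p.length - 1) ++ [p.length - 1] := by
    conv_lhs => rw [show p.length = (p.length - 1) + 1 by omega]
    rw [List.range_succ]
  rw [hrange, List.map_append, List.nil_append]
  congr 1
  · apply List.map_congr_left
    intro t ht
    rw [Nat.zero_add]
    exact entryA_eq_fF p t (by have := List.mem_range.mp ht; omega)
  · simp only [List.map_cons, List.map_nil]
    congr 1
    unfold fF
    rw [if_neg (by omega : ¬ (p.length - 1 + 1 < p.length ∧ p.getD (p.length - 1 + 1) 0 < p.getD (p.length - 1) 0))]
    by_cases h1 : p.length - 1 = 0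
    · rw [if_pos h1]
      rw [h1]
      split_ifs <;> omega
    · rw [if_neg h1]
      have h2 : p.length - 1 - 1 = p.length - 2 := by omega
      rw [h2]
      split_ifs <;> omega

theorem B_closed (p : List Int) :
    getBonuses_alt p = (List.range p.length).map (fF p) := by
  unfold getBonuses_alt
  dsimp only
  apply List.ext_getElem
  · rw [pass_length, pass_length]
    simp
  · intro k h1 h2
    have hklen : k < p.length := by
      have h1' := h1
      rw [pass_length, pass_length] at h1'
      simpa using h1'
    have hres1len : ((PySem.List.pyRange 1 ((p.length : Int)) 1).foldl
        (fun res i => if PySem.List.pyGetD p i 0 > PySem.List.pyGetD p (i - 1) 0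
          then PySem.List.pySetD res i (PySem.List.pyGetD res i 0 + 1) else res)
        (List.replicate p.length (1:Int))).length = p.length := by
      rw [pass_length]
      simp
    have hg2 := pass_getD_int (fun i => PySem.List.pyGetD p i 0 > PySem.List.pyGetD p (i + 1) 0)
        0 ((p.length : Int) - 1)
        ((PySem.List.pyRange 1 ((p.length : Int)) 1).foldl
          (fun res i => if PySem.List.pyGetD p i 0 > PySem.List.pyGetD p (i - 1) 0
            then PySem.List.pySetD res i (PySem.List.pyGetD res i 0 + 1) else res)
          (List.replicate p.length (1:Int)))
        (le_refl 0) (by rw [hres1len]; omega) k (by omega)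
    have hg1 := pass_getD_int (fun i => PySem.List.pyGetD p i 0 > PySem.List.pyGetD p (i - 1) 0)
        1 ((p.length : Int)) (List.replicate p.length (1:Int)) (by omega) (by simp) k
        (by simpa using hklen)
    beta_reduce at hg1 hg2
    have hg0 : (List.replicate p.length (1:Int)).getD k 0 = 1 := by
      rw [List.getD_eq_getElem _ _ (by simpa using hklen)]
      simp
    have hfwd : (if (1:Int) ≤ (k:Int) ∧ (k:Int) < (p.length:Int) ∧
        PySem.List.pyGetD p (k:Int) 0 > PySem.List.pyGetD p ((k:Int) - 1) 0 then (1:Int) else 0)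
        = (if 0 < k ∧ p.getD k 0 > p.getD (k-1) 0 then 1 else 0) := by
      by_cases hk0 : 0 < k
      · have e : ((k:Int) - 1) = ((k - 1 : Nat) : Int) := by omega
        rw [e]
        simp only [PySem.List.pyGetD_natCast]
        by_cases hgt : p.getD k 0 > p.getD (k-1) 0
        · rw [if_pos ⟨by omega, by exact_mod_cast hklen, hgt⟩, if_pos ⟨hk0, hgt⟩]
        · rw [if_neg (fun h => hgt h.2.2), if_neg (fun h => hgt h.2)]
      · rw [if_neg (by rintro ⟨x, -, -⟩; omega), if_neg (fun h => hk0 h.1)]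
    have hbwd : (if (0:Int) ≤ (k:Int) ∧ (k:Int) < (p.length:Int) - 1 ∧
        PySem.List.pyGetD p (k:Int) 0 > PySem.List.pyGetD p ((k:Int) + 1) 0 then (1:Int) else 0)
        = (if k + 1 < p.length ∧ p.getD k 0 > p.getD (k+1) 0 then 1 else 0) := by
      have e : ((k:Int) + 1) = ((k + 1 : Nat) : Int) := by push_cast; ring
      rw [e]
      simp only [PySem.List.pyGetD_natCast]
      by_cases hc : k + 1 < p.length ∧ p.getD k 0 > p.getD (k+1) 0
      · rw [if_pos ⟨by omega, by omega, hc.2⟩, if_pos hc]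
      · rw [if_neg ?_, if_neg hc]
        rintro ⟨-, y, z⟩
        exact hc ⟨by omega, z⟩
    calc _ = _ := (List.getD_eq_getElem _ 0 h1).symm
      _ = ((List.range p.length).map (fF p)).getD k 0 := ?_
      _ = _ := List.getD_eq_getElem _ 0 h2
    rw [hg2, hg1, hg0]
    rw [List.getD_eq_getElem _ _ h2, List.getElem_map, List.getElem_range]
    unfold fF
    rw [hfwd, hbwd]

-- ===== VERDICT (by name: the statement is the Claim_ definition above) =====
theorem getBonuses_spec : Claim_equal_getBonuses := by
  intro p _ hpre
  unfold Spec_getBonuses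
  rw [A_closed p hpre, B_closed p]
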